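-- pv_equiv track=rewrite | github.com/mathieudelehaye/SummarEaseAI | backend/models/agents/article_selection_agent.py | _extract_multiple_articles_from_response
-- ===== SOURCE A (Python) =====
-- from typing import Any, Dict, List
--
-- def _extract_multiple_articles_from_response(
--     response: str, options: List[str], max_count: int
-- ) -> List[str]:
--     """Extract multiple selected articles from agent response"""
--     response_lines = [line.strip() for line in response.split("\n") if line.strip()]
--     selected = []
--
--     # Try to match each line to an article title
--     for line in response_lines:
--         line_clean = line.lower()
--         # Remove numbering if present (e.g., "1. Article Title" -> "Article Title")
--         line_clean = line_clean.split(".", 1)[-1].strip()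
--
--         best_match = None
--         best_score = 0
--
--         for option in options:
--             if option not in selected:  # Avoid duplicates
--                 option_clean = option.lower()
--                 # Check for exact match or substring match
--                 if (
--                     option_clean == line_clean
--                     or option_clean in line_clean
--                     or line_clean in option_clean
--                 ):
--                     # Prefer exact matches
--                     score = 2 if option_clean == line_clean else 1
--                     if score > best_score:
--                         best_match = option
--                         best_score = score
--
--         if best_match:
--             selected.append(best_match)
--
--         if len(selected) >= max_count:
--             break
--
--     # Fill remaining slots with unselected options if needed
--     if len(selected) < max_count:
--         for option in options:
--             if option not in selected:
--                 selected.append(option)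
--                 if len(selected) >= max_count:
--                     break
--
--     return selected[:max_count]
-- ===== SOURCE B (Python) =====
-- from typing import List
--
--
-- def _extract_multiple_articles_from_response(
--     response: str, options: List[str], max_count: int
-- ) -> List[str]:
--     """Precompute cleaned line keys once, then drive the selection with a shrinking
--     'remaining' pool (so no membership tests against 'selected'); pick per key by two
--     ordered find-first passes: exact lowercase match, else first substring match."""
--     keys = []
--     for raw in response.split("\n"):
--         line = raw.strip()
--         if line:
--             keys.append(line.lower().split(".", 1)[-1].strip())
--
--     selected: List[str] = []
--     remaining = list(options)
--     for key in keys: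
--         pick = None
--         for o in remaining:
--             if o.lower() == key:
--                 pick = o
--                 break
--         if pick is None:
--             for o in remaining:
--                 ol = o.lower()
--                 if ol in key or key in ol:
--                     pick = o
--                     break
--         if pick:
--             selected.append(pick)
--             remaining = [o for o in remaining if o != pick]
--         if len(selected) >= max_count:
--             return selected[:max_count]
--
--     if len(selected) < max_count:
--         for o in remaining:
--             if o not in selected:
--                 selected.append(o)
--     return selected[:max_count]
-- ===== Notes on version B (the rewrite author's own statement) =====
-- stated objective: alternative
-- what changed: B precomputes the cleaned line keys in a separate first pass and replaces A's score-accumulating inner scan plus 'option not in selected' membership tests with a shrinking 'remaining' pool updated by filtering out the picked option, choosing per key by two ordered find-first passes (exact lowercase match, else first substring match); the fill step becomes a plain no-break append over the pool capped by the final slice.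
import Mathlib
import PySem

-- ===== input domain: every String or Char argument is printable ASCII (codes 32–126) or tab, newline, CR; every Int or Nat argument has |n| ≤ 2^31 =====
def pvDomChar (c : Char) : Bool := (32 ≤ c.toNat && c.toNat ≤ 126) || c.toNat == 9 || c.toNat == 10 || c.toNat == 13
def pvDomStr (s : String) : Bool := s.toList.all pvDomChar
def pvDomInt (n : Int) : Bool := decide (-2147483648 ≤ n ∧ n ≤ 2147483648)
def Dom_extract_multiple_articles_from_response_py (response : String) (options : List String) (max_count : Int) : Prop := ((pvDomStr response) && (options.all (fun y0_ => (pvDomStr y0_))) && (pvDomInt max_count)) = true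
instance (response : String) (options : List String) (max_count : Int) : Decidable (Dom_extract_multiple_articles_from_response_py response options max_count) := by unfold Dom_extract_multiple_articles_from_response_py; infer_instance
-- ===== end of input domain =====

-- B precomputes the cleaned line keys once and drives the selection with a shrinking
-- 'remaining' pool (no membership tests against 'selected'), picking per key by two
-- ordered find-first passes (exact lowercase match, else first substring match);
-- objective: simpler. Return value only; neither version mutates arguments.

-- ===== PORT A =====

-- line.lower().split(".", 1)[-1].strip()  — split(".",1) always returns a nonempty list,
-- so the [-1] (ported as pyGetD with index -1) never hits its default.
def pvLineClean (line : String) : String :=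
  PySem.Str.strip
    (PySem.List.pyGetD ((PySem.Str.splitMax? (PySem.Str.lower line) "." 1).getD []) (-1) "")

-- one step of A's inner scan: state (best_match, best_score)
def pvStepA (selected : List String) (line_clean : String) (st : Option String × Int)
    (option : String) : Option String × Int :=
  if selected.contains option then st
  else
    let option_clean := PySem.Str.lower option
    if option_clean == line_clean || PySem.Str.isIn option_clean line_clean
        || PySem.Str.isIn line_clean option_clean then
      let score : Int := if option_clean == line_clean then 2 else 1
      if score > st.2 then (some option, score) else st
    else st

def pvInnerA (selected : List String) (line_clean : String) (options : List String) :
    Option String × Int :=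
  options.foldl (pvStepA selected line_clean) (none, 0)

-- the fill-remaining loop of A (with its break)
def pvFillA (max_count : Int) : List String → List String → List String
  | [], selected => selected
  | option :: rest, selected =>
    if selected.contains option then
      pvFillA max_count rest selected
    else
      let selected := selected ++ [option]
      if max_count ≤ PySem.List.len selected then selected
      else pvFillA max_count rest selected

-- A's outer loop over response_lines (with its break)
def pvLoopA (options : List String) (max_count : Int) :
    List String → List String → List String
  | [], selected => selected
  | line :: rest, selected =>
    let line_clean := pvLineClean line
    let best_match := (pvInnerA selected line_clean options).1
    -- 'if best_match:' — a None or empty-string match is falsy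
    let selected :=
      match best_match with
      | some bm => if bm = "" then selected else selected ++ [bm]
      | none => selected
    if max_count ≤ PySem.List.len selected then selected
    else pvLoopA options max_count rest selected

def extract_multiple_articles_from_response_py (response : String) (options : List String)
    (max_count : Int) : List String :=
  -- split("\n") with a nonempty separator always succeeds
  let response_lines :=
    (((PySem.Str.split? response "\n").getD []).map PySem.Str.strip).filter (fun l => l ≠ "")
  let selected := pvLoopA options max_count response_lines []
  let selected :=
    if PySem.List.len selected < max_count then pvFillA max_count options selected
    else selected
  PySem.List.slice selected none (some max_count)

-- ===== PORT B =====

-- first pass of Source B: 'keys.append(line.lower().split(".", 1)[-1].strip())' for non-blank lines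
def pvKeysB (response : String) : List String :=
  ((PySem.Str.split? response "\n").getD []).foldl
    (fun keys raw =>
      if PySem.Str.strip raw != "" then keys ++ [pvLineClean (PySem.Str.strip raw)] else keys)
    []

-- Source B's two ordered find-first passes over the remaining pool
def pvPick (remaining : List String) (key : String) : Option String :=
  match remaining.find? (fun o => PySem.Str.lower o == key) with
  | some o => some o
  | none =>
    remaining.find? (fun o =>
      PySem.Str.isIn (PySem.Str.lower o) key || PySem.Str.isIn key (PySem.Str.lower o))

-- Source B's fill loop (no break; the final slice caps the length)
def pvFillB : List String → List String → List String
  | [], selected => selected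
  | o :: rest, selected =>
    if selected.contains o then pvFillB rest selected
    else pvFillB rest (selected ++ [o])

-- Source B's main loop: state (selected, remaining); early 'return selected[:max_count]'
def pvLoopB (max_count : Int) : List String → List String → List String → List String
  | [], selected, remaining =>
    let selected :=
      if PySem.List.len selected < max_count then pvFillB remaining selected else selected
    PySem.List.slice selected none (some max_count)
  | key :: rest, selected, remaining =>
    let pick := pvPick remaining key
    match pick with
    | some p =>
      -- 'if pick:' — "" is falsy, nothing is appended or removed
      if p = "" then
        if max_count ≤ PySem.List.len selected then
          PySem.List.slice selected none (some max_count)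
        else pvLoopB max_count rest selected remaining
      else
        let selected := selected ++ [p]
        let remaining := remaining.filter (fun o => o ≠ p)
        if max_count ≤ PySem.List.len selected then
          PySem.List.slice selected none (some max_count)
        else pvLoopB max_count rest selected remaining
    | none =>
      if max_count ≤ PySem.List.len selected then
        PySem.List.slice selected none (some max_count)
      else pvLoopB max_count rest selected remaining

def extract_multiple_articles_from_response_py_alt (response : String)
    (options : List String) (max_count : Int) : List String :=
  pvLoopB max_count (pvKeysB response) [] options

-- ===== PRECONDITION & SPEC =====
def Spec_extract_multiple_articles_from_response_py (response : String) (options : List String) (max_count : Int) (out : List String) : Prop := out = extract_multiple_articles_from_response_py_alt response options max_count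
instance (response : String) (options : List String) (max_count : Int) (out : List String) : Decidable (Spec_extract_multiple_articles_from_response_py response options max_count out) := by unfold Spec_extract_multiple_articles_from_response_py; infer_instance

-- ===== CLAIM (what is proved, stated in full; the proofs are below) =====
def Claim_equal_extract_multiple_articles_from_response_py : Prop := ∀ (response : String) (options : List String) (max_count : Int), Dom_extract_multiple_articles_from_response_py response options max_count → Spec_extract_multiple_articles_from_response_py response options max_count (extract_multiple_articles_from_response_py response options max_count)

-- ===== LEMMAS AND PROOFS =====

-- ----- A's inner scan picks: first exact match if any, else first substring match -----

lemma pvStepA_of_mem {selected : List String} {lc o : String} (st : Option String × Int)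
    (hm : o ∈ selected) : pvStepA selected lc st o = st := by
  simp [pvStepA, hm]

lemma pvStepA_exact {selected : List String} {lc o : String} (st : Option String × Int)
    (hm : o ∉ selected) (he : PySem.Str.lower o = lc) :
    pvStepA selected lc st o = if st.2 < 2 then (some o, 2) else st := by
  simp [pvStepA, hm, he]

lemma pvStepA_sub {selected : List String} {lc o : String} (st : Option String × Int)
    (hm : o ∉ selected) (he : ¬ PySem.Str.lower o = lc)
    (hs : PySem.Chars.isIn (PySem.Chars.lower o.toList) lc.toList = true
        ∨ PySem.Chars.isIn lc.toList (PySem.Chars.lower o.toList) = true) :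
    pvStepA selected lc st o = if st.2 < 1 then (some o, 1) else st := by
  rcases hs with hs | hs <;> simp [pvStepA, hm, he, hs]

lemma pvStepA_none {selected : List String} {lc o : String} (st : Option String × Int)
    (hm : o ∉ selected) (he : ¬ PySem.Str.lower o = lc)
    (hs : ¬ (PySem.Chars.isIn (PySem.Chars.lower o.toList) lc.toList = true
        ∨ PySem.Chars.isIn lc.toList (PySem.Chars.lower o.toList) = true)) :
    pvStepA selected lc st o = st := by
  simp [pvStepA, hm, he, (not_or.mp hs).1, (not_or.mp hs).2]

-- B-side predicates seen over the full options list, through the 'remaining' filter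
def pvExactP (selected : List String) (lc : String) (o : String) : Bool :=
  !selected.contains o && (PySem.Str.lower o == lc)

def pvSubP (selected : List String) (lc : String) (o : String) : Bool :=
  !selected.contains o
    && (PySem.Str.isIn (PySem.Str.lower o) lc || PySem.Str.isIn lc (PySem.Str.lower o))

-- once best_score is 2, A's scan never changes state again
lemma pvInnerA_absorb (selected : List String) (lc : String) (opts : List String)
    (x : String) :
    opts.foldl (pvStepA selected lc) (some x, 2) = (some x, 2) := by
  induction opts with
  | nil => rfl
  | cons o rest ih =>
    rw [List.foldl_cons]
    have hstep : pvStepA selected lc (some x, 2) o = (some x, 2) := by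
      unfold pvStepA
      dsimp only
      split_ifs <;> first | rfl | (exfalso; omega)
    rw [hstep, ih]

-- from best_score 1, only the first exact match can still change the result
lemma pvInnerA_from_one (selected : List String) (lc : String) (opts : List String)
    (b : Option String) :
    opts.foldl (pvStepA selected lc) (b, 1) =
      match opts.find? (pvExactP selected lc) with
      | some e => (some e, 2)
      | none => (b, 1) := by
  induction opts with
  | nil => rfl
  | cons o rest ih =>
    rw [List.foldl_cons, List.find?_cons]
    by_cases hm : o ∈ selected
    · have h1 : pvExactP selected lc o = false := by simp [pvExactP, hm]
      rw [pvStepA_of_mem _ hm, h1, ih]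
    · by_cases he : PySem.Str.lower o = lc
      · have h1 : pvExactP selected lc o = true := by simp [pvExactP, hm, he]
        rw [pvStepA_exact _ hm he, if_pos (by norm_num), h1, pvInnerA_absorb]
      · have h1 : pvExactP selected lc o = false := by simp [pvExactP, hm, he]
        rw [h1]
        by_cases hs : PySem.Chars.isIn (PySem.Chars.lower o.toList) lc.toList = true
            ∨ PySem.Chars.isIn lc.toList (PySem.Chars.lower o.toList) = true
        · rw [pvStepA_sub _ hm he hs, if_neg (by norm_num), ih]
        · rw [pvStepA_none _ hm he hs, ih]

-- A's inner scan = find first exact, else find first substring (over options, with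
-- the not-yet-selected test folded into the predicates)
lemma pvInnerA_eq_finds (selected : List String) (lc : String) (opts : List String) :
    (pvInnerA selected lc opts).1 =
      match opts.find? (pvExactP selected lc) with
      | some o => some o
      | none => opts.find? (pvSubP selected lc) := by
  induction opts with
  | nil => rfl
  | cons o rest ih =>
    unfold pvInnerA at *
    rw [List.foldl_cons, List.find?_cons, List.find?_cons]
    by_cases hm : o ∈ selected
    · have h1 : pvExactP selected lc o = false := by simp [pvExactP, hm]
      have h2 : pvSubP selected lc o = false := by simp [pvSubP, hm]
      rw [pvStepA_of_mem _ hm, h1, h2]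
      exact ih
    · by_cases he : PySem.Str.lower o = lc
      · have h1 : pvExactP selected lc o = true := by simp [pvExactP, hm, he]
        rw [pvStepA_exact _ hm he, if_pos (by norm_num), h1, pvInnerA_absorb]
      · have h1 : pvExactP selected lc o = false := by simp [pvExactP, hm, he]
        by_cases hs : PySem.Chars.isIn (PySem.Chars.lower o.toList) lc.toList = true
            ∨ PySem.Chars.isIn lc.toList (PySem.Chars.lower o.toList) = true
        · have h2 : pvSubP selected lc o = true := by
            rcases hs with hs | hs <;> simp [pvSubP, hm, hs]
          rw [pvStepA_sub _ hm he hs, if_pos (by norm_num), h1, h2,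
            pvInnerA_from_one selected lc rest (some o)]
          cases rest.find? (pvExactP selected lc) <;> rfl
        · have h2 : pvSubP selected lc o = false := by
            simp [pvSubP, hm, (not_or.mp hs).1, (not_or.mp hs).2]
          rw [pvStepA_none _ hm he hs, h1, h2]
          exact ih

-- ----- the remaining-pool invariant -----

-- B's pick over remaining = A's inner scan over options, through find?_filter
lemma pvPick_filter (options selected : List String) (lc : String) :
    pvPick (options.filter (fun o => !selected.contains o)) lc =
      (pvInnerA selected lc options).1 := by
  rw [pvInnerA_eq_finds]
  unfold pvPick
  rw [List.find?_filter, List.find?_filter]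
  have e1 : ∀ o : String, decide ((!selected.contains o) = true ∧ (PySem.Str.lower o == lc) = true)
      = pvExactP selected lc o := by
    intro o; by_cases h : PySem.Str.lower o = lc <;> simp [pvExactP, h]
  have e2 : ∀ o : String, decide ((!selected.contains o) = true ∧
      (PySem.Str.isIn (PySem.Str.lower o) lc || PySem.Str.isIn lc (PySem.Str.lower o)) = true)
      = pvSubP selected lc o := by
    intro o; simp [pvSubP]
  rw [funext e1, funext e2]

-- removing the picked element from the pool = filtering by the grown selected list
lemma pvRemaining_step (options selected : List String) (p : String) :
    (options.filter (fun o => !selected.contains o)).filter (fun o => o ≠ p) =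
      options.filter (fun o => !(selected ++ [p]).contains o) := by
  rw [List.filter_filter]
  apply List.filter_congr
  intro o _
  by_cases h1 : o = p <;> by_cases h2 : o ∈ selected <;> simp [h1, h2]

-- ----- the two fill loops agree under the final slice -----

lemma pvFillB_append (rem selected : List String) :
    ∃ t, pvFillB rem selected = selected ++ t := by
  induction rem generalizing selected with
  | nil => exact ⟨[], by simp [pvFillB]⟩
  | cons o rest ih =>
    by_cases h : selected.contains o
    · rw [show pvFillB (o :: rest) selected = pvFillB rest selected by
        simp only [pvFillB]; rw [if_pos h]]
      exact ih selected
    · obtain ⟨t, ht⟩ := ih (selected ++ [o])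
      refine ⟨o :: t, ?_⟩
      rw [show pvFillB (o :: rest) selected = pvFillB rest (selected ++ [o]) by
        simp only [pvFillB]; rw [if_neg h], ht]
      simp

-- B's fill ignores pool elements already in a superset of the filtered-out set
lemma pvFillB_filter (options sel0 selected : List String)
    (hsub : ∀ o, o ∈ sel0 → o ∈ selected) :
    pvFillB (options.filter (fun o => !sel0.contains o)) selected =
      pvFillB options selected := by
  induction options generalizing selected with
  | nil => rfl
  | cons o rest ih =>
    rw [List.filter_cons]
    by_cases h0 : sel0.contains o
    · rw [if_neg (by simpa using h0)]
      have hsel : selected.contains o = true := by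
        simpa using hsub o (by simpa using h0)
      rw [show pvFillB (o :: rest) selected = pvFillB rest selected by
        simp only [pvFillB]; rw [if_pos hsel]]
      exact ih selected hsub
    · rw [if_pos (by simpa using h0)]
      by_cases hsel : selected.contains o
      · rw [show pvFillB (o :: rest) selected = pvFillB rest selected by
            simp only [pvFillB]; rw [if_pos hsel],
          show pvFillB (o :: (rest.filter (fun o => !sel0.contains o))) selected
              = pvFillB (rest.filter (fun o => !sel0.contains o)) selected by
            simp only [pvFillB]; rw [if_pos hsel]]
        exact ih selected hsub
      · rw [show pvFillB (o :: rest) selected = pvFillB rest (selected ++ [o]) by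
            simp only [pvFillB]; rw [if_neg hsel],
          show pvFillB (o :: (rest.filter (fun o => !sel0.contains o))) selected
              = pvFillB (rest.filter (fun o => !sel0.contains o)) (selected ++ [o]) by
            simp only [pvFillB]; rw [if_neg hsel]]
        exact ih (selected ++ [o]) (fun x hx => List.mem_append_left _ (hsub x hx))

-- A's breaking fill and B's non-breaking fill agree once both are sliced to max_count
lemma pvFill_slice (max_count : Int) (opts : List String) :
    ∀ selected : List String, PySem.List.len selected < max_count →
      PySem.List.slice (pvFillA max_count opts selected) none (some max_count) =
        PySem.List.slice (pvFillB opts selected) none (some max_count) := by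
  induction opts with
  | nil => intro selected _; rfl
  | cons o rest ih =>
    intro selected hlt
    by_cases hc : selected.contains o
    · simp only [pvFillA, pvFillB, hc, if_true]
      exact ih selected hlt
    · simp only [pvFillA, pvFillB, hc, Bool.false_eq_true, if_false]
      by_cases hbrk : max_count ≤ PySem.List.len (selected ++ [o])
      · simp only [hbrk, if_true]
        -- here max_count = len (selected ++ [o]); both sides slice to that prefix
        have hlen : ((selected ++ [o]).length : Int) = max_count := by
          simp only [PySem.List.len_eq] at hlt hbrk ⊢
          simp only [List.length_append, List.length_cons, List.length_nil] at hbrk ⊢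
          omega
        obtain ⟨t, ht⟩ := pvFillB_append rest (selected ++ [o])
        rw [ht, ← hlen, PySem.List.slice_to_natCast, PySem.List.slice_to_natCast,
          List.take_length, List.take_left]
      · simp only [hbrk, if_false]
        exact ih (selected ++ [o]) (by
          simp only [PySem.List.len_eq, not_le] at hbrk ⊢
          exact hbrk)

-- ----- B's key precomputation = A's stripped non-blank lines, cleaned -----

lemma pvKeysB_eq (response : String) :
    pvKeysB response =
      ((((PySem.Str.split? response "\n").getD []).map PySem.Str.strip).filter
        (fun l => l ≠ "")).map pvLineClean := by
  unfold pvKeysB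
  rw [PySem.List.foldl_append_if
    (p := fun raw => PySem.Str.strip raw != "")
    (f := fun raw => pvLineClean (PySem.Str.strip raw)), List.filter_map, List.map_map]
  rw [List.nil_append]
  apply congrArg
  apply List.filter_congr
  intro x _
  by_cases hx : PySem.Str.strip x = "" <;> simp [bne, hx]

-- ----- the main loop correspondence -----

lemma pvLoopB_eq_pvLoopA (options : List String) (max_count : Int) (ls : List String) :
    ∀ selected : List String,
      pvLoopB max_count (ls.map pvLineClean) selected
          (options.filter (fun o => !selected.contains o)) =
        (let s := pvLoopA options max_count ls selected
         let s := if PySem.List.len s < max_count then pvFillA max_count options s else s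
         PySem.List.slice s none (some max_count)) := by
  induction ls with
  | nil =>
    intro selected
    simp only [List.map_nil, pvLoopB, pvLoopA]
    by_cases h : PySem.List.len selected < max_count
    · simp only [h, if_true]
      rw [pvFill_slice max_count options selected h,
        pvFillB_filter options selected selected (fun _ hx => hx)]
    · simp only [h, if_false]
  | cons line rest ih =>
    intro selected
    simp only [List.map_cons, pvLoopB, pvPick_filter options selected (pvLineClean line),
      pvLoopA]
    cases hb : (pvInnerA selected (pvLineClean line) options).1 with
    | none =>
      simp only
      by_cases hc : max_count ≤ PySem.List.len selected
      · simp only [hc, if_true, not_lt.mpr hc, if_false]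
      · simp only [hc, if_false, ih selected]
    | some bm =>
      by_cases hbe : bm = ""
      · simp only [hbe, if_true]
        by_cases hc : max_count ≤ PySem.List.len selected
        · simp only [hc, if_true, not_lt.mpr hc, if_false]
        · simp only [hc, if_false, ih selected]
      · simp only [hbe, if_false, pvRemaining_step options selected bm]
        by_cases hc : max_count ≤ PySem.List.len (selected ++ [bm])
        · simp only [hc, if_true, not_lt.mpr hc, if_false]
        · simp only [hc, if_false, ih (selected ++ [bm])]

-- ===== VERDICT (by name: the statement is the Claim_ definition above) =====
theorem extract_multiple_articles_from_response_py_spec :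
    Claim_equal_extract_multiple_articles_from_response_py := by
  intro response options max_count _
  show _ = _
  rw [extract_multiple_articles_from_response_py_alt, pvKeysB_eq]
  have h := pvLoopB_eq_pvLoopA options max_count
    ((((PySem.Str.split? response "\n").getD []).map PySem.Str.strip).filter
      (fun l => l ≠ "")) []
  simp only [List.contains_nil, Bool.not_false, List.filter_true] at h
  rw [h]
  rfl
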